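-- pv_equiv track=rewrite | github.com/Vladimir-Study/home_work_regexp | main.py | create_list_to_write
-- ===== SOURCE A (Python) =====
-- def create_list_to_write(source_list):
--     write_list = []
--     person_list = []
--     for person in source_list:
--         if not person_list:
--             person_list.append(person[0])
--             write_list.append(person)
--         elif person[0] not in person_list:
--             person_list.append(person[0])
--             write_list.append(person)
--         elif person[0] in person_list:
--             for write in write_list:
--                 if person[0] == write[0] and person[1] == write[1]:
--                     for i in range(len(person)):
--                         if write[i] == '' and person[i] != '':
--                             write[i] = person[i]
--     return write_list
-- ===== SOURCE B (Python) =====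
-- def create_list_to_write(source_list):
--     # Two passes: group records by first field (insertion order), then merge each group.
--     groups = {}
--     for person in source_list:
--         groups.setdefault(person[0], []).append(person)
--     result = []
--     for records in groups.values():
--         kept = records[0]
--         result.append(kept)
--         for record in records[1:]:
--             if record[1] == kept[1]:
--                 for i in range(len(record)):
--                     if kept[i] == '' and record[i] != '':
--                         kept[i] = record[i]
--     return result
-- ===== Notes on version B (the rewrite author's own statement) =====
-- stated objective: alternative
-- what changed: B replaces A's single online scan (a seen-keys list membership test plus a linear rescan of write_list for every duplicate) by two passes: one dict pass grouping records by their first field in insertion order, then a per-group merge of each group's tail into its first record.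
import Mathlib
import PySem

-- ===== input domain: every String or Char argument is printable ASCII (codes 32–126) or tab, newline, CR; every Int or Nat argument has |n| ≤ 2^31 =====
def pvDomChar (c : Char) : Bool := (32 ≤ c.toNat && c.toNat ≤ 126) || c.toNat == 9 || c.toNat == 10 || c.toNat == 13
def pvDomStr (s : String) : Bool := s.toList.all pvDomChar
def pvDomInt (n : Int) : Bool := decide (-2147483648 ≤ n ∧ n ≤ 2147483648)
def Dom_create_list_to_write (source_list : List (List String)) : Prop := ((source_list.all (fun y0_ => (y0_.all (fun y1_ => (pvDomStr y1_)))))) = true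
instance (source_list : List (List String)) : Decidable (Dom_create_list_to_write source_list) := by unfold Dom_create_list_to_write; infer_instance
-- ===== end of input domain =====

-- B groups records by first field in one dict pass, then merges each group, instead of A's single online
-- scan. Equivalence is about the RETURN value; both Pythons mutate the kept records in place.


-- ===== PORT A =====
-- the inner 'for i in range(len(person)): if write[i]=='' and person[i]!='': write[i]=person[i]'
-- (identical in both Pythons; indexing via getD/set is exact inside Pre_, where all indices are in range)
def pvMergeFields (person write : List String) : List String :=
  (List.range person.length).foldl
    (fun w i => if w.getD i "" = "" ∧ person.getD i "" ≠ "" then w.set i (person.getD i "") else w)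
    write

-- one iteration of A's 'for person in source_list' loop over the state (write_list, person_list)
def pvStepA (st : List (List String) × List String) (person : List String) :
    List (List String) × List String :=
  if st.2.isEmpty then
    (st.1 ++ [person], st.2 ++ [person.getD 0 ""])
  else if person.getD 0 "" ∉ st.2 then
    (st.1 ++ [person], st.2 ++ [person.getD 0 ""])
  else
    (st.1.map (fun write =>
      if person.getD 0 "" = write.getD 0 "" ∧ person.getD 1 "" = write.getD 1 ""
      then pvMergeFields person write else write), st.2)

def create_list_to_write (source_list : List (List String)) : List (List String) :=
  (source_list.foldl pvStepA ([], [])).1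

-- ===== PORT B =====
-- first pass: groups.setdefault(person[0], []).append(person)
def pvGroup (source_list : List (List String)) : PySem.Dict String (List (List String)) :=
  source_list.foldl
    (fun d person => d.insert (person.getD 0 "") (d.getD (person.getD 0 "") [] ++ [person]))
    PySem.Dict.empty

-- second pass, one group: kept = records[0]; fold records[1:] into it
def pvMergeGroup (records : List (List String)) : List String :=
  (records.drop 1).foldl
    (fun kept record =>
      if record.getD 1 "" = kept.getD 1 "" then pvMergeFields record kept else kept)
    (records.headD [])

def create_list_to_write_alt (source_list : List (List String)) : List (List String) :=
  (pvGroup source_list).values.map pvMergeGroup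

-- ===== PRECONDITION & SPEC =====
-- Pre_ excludes exactly the inputs on which Python A raises IndexError: an empty record (person[0]),
-- or a duplicate record (same first field as the kept first occurrence) where person[1]/write[1] is
-- missing, or — when the second fields match — the duplicate is longer than the kept record (write[i]).
def Pre_create_list_to_write (source_list : List (List String)) : Prop :=
  (∀ r ∈ source_list, r ≠ []) ∧
  ∀ k, k < source_list.length → ∀ j, j < k →
    (source_list.getD j []).getD 0 "" = (source_list.getD k []).getD 0 "" →
    (∀ j', j' < j → (source_list.getD j' []).getD 0 "" ≠ (source_list.getD k []).getD 0 "") →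
    (2 ≤ (source_list.getD k []).length ∧ 2 ≤ (source_list.getD j []).length ∧
     ((source_list.getD k []).getD 1 "" = (source_list.getD j []).getD 1 "" →
      (source_list.getD k []).length ≤ (source_list.getD j []).length))
instance (source_list : List (List String)) : Decidable (Pre_create_list_to_write source_list) := by
  unfold Pre_create_list_to_write
  exact @instDecidableAnd _ _ inferInstance (Nat.decidableBallLT _ _)

def pvWitness_create_list_to_write : List (List String) := [["a", "b", ""], ["a", "b", "c"]]

def Spec_create_list_to_write (source_list : List (List String)) (out : List (List String)) : Prop := out = create_list_to_write_alt source_list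
instance (source_list : List (List String)) (out : List (List String)) : Decidable (Spec_create_list_to_write source_list out) := by unfold Spec_create_list_to_write; infer_instance

-- ===== CLAIM (what is proved, stated in full; the proofs are below) =====
def Claim_equal_create_list_to_write : Prop := ∀ (source_list : List (List String)), Dom_create_list_to_write source_list → Pre_create_list_to_write source_list → Spec_create_list_to_write source_list (create_list_to_write source_list)

-- ===== LEMMAS AND PROOFS =====

-- the merge loop never changes entry 0 when the incoming record agrees with it there
theorem pvMergeFields_getD_zero (person : List String) (l : List Nat) (w : List String)
    (h : w.getD 0 "" = person.getD 0 "") :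
    (l.foldl
      (fun w i => if w.getD i "" = "" ∧ person.getD i "" ≠ "" then w.set i (person.getD i "") else w)
      w).getD 0 "" = person.getD 0 "" := by
  induction l generalizing w with
  | nil => simpa using h
  | cons i t ih =>
    simp only [List.foldl_cons]
    split_ifs with hc
    · rcases hc with ⟨h0, h1⟩
      rcases Nat.eq_zero_or_pos i with hi | hi
      · subst hi; rw [h0] at h; exact absurd h.symm h1
      · apply ih
        have : (w.set i (person.getD i "")).getD 0 "" = w.getD 0 "" := by
          simp [List.getD_eq_getElem?_getD, List.getElem?_set_ne (by omega : i ≠ 0)]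
        rw [this, h]
    · exact ih w h

-- merging a group whose records all start with k yields a record starting with k
theorem pvMergeGroup_getD_zero (k : String) (t : List (List String)) (w : List String)
    (hw : w.getD 0 "" = k) (ht : ∀ r ∈ t, r.getD 0 "" = k) :
    (t.foldl
      (fun kept record =>
        if record.getD 1 "" = kept.getD 1 "" then pvMergeFields record kept else kept)
      w).getD 0 "" = k := by
  induction t generalizing w with
  | nil => simpa using hw
  | cons r t ih =>
    simp only [List.foldl_cons]
    apply ih
    · split_ifs with hg
      · have hr : r.getD 0 "" = k := ht r (by simp)
        have h2 := pvMergeFields_getD_zero r (List.range r.length) w (by rw [hw, hr])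
        rw [pvMergeFields, h2, hr]
      · exact hw
    · intro r' hr'; exact ht r' (by simp [hr'])

theorem pvMergeGroup_singleton (p : List String) : pvMergeGroup [p] = p := by
  simp [pvMergeGroup]

theorem pvMergeGroup_append (r : List String) (t : List (List String)) (p : List String) :
    pvMergeGroup ((r :: t) ++ [p]) =
      (if p.getD 1 "" = (pvMergeGroup (r :: t)).getD 1 "" then
        pvMergeFields p (pvMergeGroup (r :: t)) else pvMergeGroup (r :: t)) := by
  simp [pvMergeGroup, List.foldl_append]

def pvInv (source_list : List (List String)) : Prop :=
  ∀ q ∈ (pvGroup source_list).items, q.2 ≠ [] ∧ ∀ r ∈ q.2, r.getD 0 "" = q.1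

theorem pvGroup_append (xs : List (List String)) (p : List String) :
    pvGroup (xs ++ [p]) =
      (pvGroup xs).insert (p.getD 0 "")
        ((pvGroup xs).getD (p.getD 0 "") [] ++ [p]) := by
  simp [pvGroup, List.foldl_append]

theorem pvGroup_nodup_keys (xs : List (List String)) : (pvGroup xs).keys.Nodup := by
  exact PySem.Dict.nodup_keys_foldl_insert_key xs (fun p => p.getD 0 "")
    (fun d person => d.getD (person.getD 0 "") [] ++ [person]) PySem.Dict.empty
    (by simp [PySem.Dict.keys_empty])

theorem pvStepA_mem (st : List (List String) × List String) (person : List String)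
    (h : person.getD 0 "" ∈ st.2) :
    pvStepA st person =
      (st.1.map (fun write =>
        if person.getD 0 "" = write.getD 0 "" ∧ person.getD 1 "" = write.getD 1 ""
        then pvMergeFields person write else write), st.2) := by
  unfold pvStepA
  have he : ¬st.2.isEmpty = true := by
    rw [List.isEmpty_iff]; intro h'; rw [h'] at h; simp at h
  rw [if_neg he, if_neg (not_not_intro h)]

theorem pvStepA_not_mem (st : List (List String) × List String) (person : List String)
    (h : person.getD 0 "" ∉ st.2) :
    pvStepA st person = (st.1 ++ [person], st.2 ++ [person.getD 0 ""]) := by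
  unfold pvStepA
  by_cases he : st.2.isEmpty = true
  · rw [if_pos he]
  · rw [if_neg he, if_pos h]

theorem pvMergeGroup_append' (recs : List (List String)) (hne : recs ≠ []) (p : List String) :
    pvMergeGroup (recs ++ [p]) =
      (if p.getD 1 "" = (pvMergeGroup recs).getD 1 "" then
        pvMergeFields p (pvMergeGroup recs) else pvMergeGroup recs) := by
  obtain ⟨r, t, hrt⟩ := List.exists_cons_of_ne_nil hne
  subst hrt
  exact pvMergeGroup_append r t p

theorem pvHead (q : String × List (List String))
    (hqne : q.2 ≠ []) (hqall : ∀ r ∈ q.2, r.getD 0 "" = q.1) :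
    (pvMergeGroup q.2).getD 0 "" = q.1 := by
  obtain ⟨r, t, hrt⟩ := List.exists_cons_of_ne_nil hqne
  rw [hrt]
  exact pvMergeGroup_getD_zero q.1 t r (hqall r (by rw [hrt]; simp))
    (fun r' hr' => hqall r' (by rw [hrt]; simp [hr']))

-- the main invariant: A's fold state is B's merged groups plus their keys, and every group
-- is nonempty and homogeneous in its first field
theorem pvMain (xs : List (List String)) :
    xs.foldl pvStepA ([], []) =
      ((pvGroup xs).items.map (fun q => pvMergeGroup q.2),
       (pvGroup xs).items.map (·.1)) ∧ pvInv xs := by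
  induction xs using List.reverseRecOn with
  | nil =>
    constructor
    · simp [pvGroup, PySem.Dict.empty]
    · intro q hq; simp [pvGroup, PySem.Dict.empty] at hq
  | append_singleton xs p ih =>
    obtain ⟨hst, hinv⟩ := ih
    have hg := pvGroup_append xs p
    rw [List.foldl_append, List.foldl_cons, List.foldl_nil, hst]
    by_cases hcon : (pvGroup xs).contains (p.getD 0 "")
    · -- existing key: A merges into the kept record, B extends the group
      have hmem : p.getD 0 "" ∈ (pvGroup xs).items.map (·.1) := by
        have := (PySem.Dict.contains_iff_mem_keys (pvGroup xs) (p.getD 0 "")).mp hcon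
        simpa [PySem.Dict.keys] using this
      have hitems : (pvGroup (xs ++ [p])).items =
          (pvGroup xs).items.map (fun q =>
            if q.1 == p.getD 0 "" then (p.getD 0 "", (pvGroup xs).getD (p.getD 0 "") [] ++ [p])
            else q) := by
        rw [hg, PySem.Dict.items_insert_of_contains _ _ hcon]
      rw [pvStepA_mem _ _ hmem]
      dsimp only
      constructor
      · rw [hitems]
        refine Prod.ext ?_ ?_
        · dsimp only
          rw [List.map_map, List.map_map]
          apply List.map_congr_left
          intro q hq
          obtain ⟨hqne, hqall⟩ := hinv q hq
          have hhead : (pvMergeGroup q.2).getD 0 "" = q.1 := pvHead q hqne hqall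
          by_cases hq1 : q.1 = p.getD 0 ""
          · have hgetD : (pvGroup xs).getD (p.getD 0 "") [] = q.2 := by
              rw [← hq1]
              exact PySem.Dict.getD_of_mem_items _ (by simpa using hq) (pvGroup_nodup_keys xs) []
            dsimp only [Function.comp]
            rw [if_pos (show (q.1 == p.getD 0 "") = true from beq_iff_eq.mpr hq1)]
            dsimp only
            rw [hgetD, pvMergeGroup_append' q.2 hqne p]
            have h0 : p.getD 0 "" = (pvMergeGroup q.2).getD 0 "" := by
              rw [hhead]; exact hq1.symm
            by_cases hgate : p.getD 1 "" = (pvMergeGroup q.2).getD 1 ""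
            · rw [if_pos ⟨h0, hgate⟩, if_pos hgate]
            · rw [if_neg (fun hh => hgate hh.2), if_neg hgate]
          · dsimp only [Function.comp]
            rw [if_neg (show ¬((q.1 == p.getD 0 "") = true) by
              simp only [beq_iff_eq]; exact hq1)]
            rw [if_neg]
            intro ⟨h1, _⟩
            rw [hhead] at h1
            exact hq1 h1.symm
        · dsimp only
          rw [List.map_map]
          apply List.map_congr_left
          intro q hq
          by_cases hq1 : q.1 = p.getD 0 ""
          · dsimp only [Function.comp]
            rw [if_pos (show (q.1 == p.getD 0 "") = true from beq_iff_eq.mpr hq1)]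
            exact hq1
          · dsimp only [Function.comp]
            rw [if_neg (show ¬((q.1 == p.getD 0 "") = true) by
              simp only [beq_iff_eq]; exact hq1)]
      · intro q hq
        rw [hitems] at hq
        obtain ⟨q', hq', hqeq⟩ := List.mem_map.mp hq
        by_cases h1 : q'.1 = p.getD 0 ""
        · have hgetD : (pvGroup xs).getD (p.getD 0 "") [] = q'.2 := by
            rw [← h1]
            exact PySem.Dict.getD_of_mem_items _ (by simpa using hq') (pvGroup_nodup_keys xs) []
          rw [if_pos (show (q'.1 == p.getD 0 "") = true from beq_iff_eq.mpr h1)] at hqeq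
          subst hqeq
          refine ⟨by simp, ?_⟩
          intro r hr
          rw [hgetD] at hr
          simp only [List.mem_append, List.mem_singleton] at hr
          rcases hr with hr | hr
          · rw [← h1]; exact (hinv q' hq').2 r hr
          · subst hr; rfl
        · rw [if_neg (show ¬((q'.1 == p.getD 0 "") = true) by
            simp only [beq_iff_eq]; exact h1)] at hqeq
          subst hqeq
          exact hinv q' hq'
    · -- new key: both append the fresh record
      have hnmem : p.getD 0 "" ∉ (pvGroup xs).items.map (·.1) := by
        intro h
        apply hcon
        apply (PySem.Dict.contains_iff_mem_keys (pvGroup xs) (p.getD 0 "")).mpr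
        simpa [PySem.Dict.keys] using h
      have hcon' : (pvGroup xs).contains (p.getD 0 "") = false := by
        simpa using hcon
      have hitems : (pvGroup (xs ++ [p])).items =
          (pvGroup xs).items ++ [(p.getD 0 "", [p])] := by
        rw [hg, PySem.Dict.items_insert_of_not_contains _ _ hcon',
          PySem.Dict.getD_of_not_contains _ _ hcon']
        simp
      rw [pvStepA_not_mem _ _ hnmem]
      constructor
      · rw [hitems]
        simp [pvMergeGroup_singleton]
      · intro q hq
        rw [hitems] at hq
        simp only [List.mem_append, List.mem_singleton] at hq
        rcases hq with hq | hq
        · exact hinv q hq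
        · subst hq
          exact ⟨by simp, by intro r hr; simp only [List.mem_singleton] at hr; subst hr; rfl⟩

-- ===== VERDICT (by name: the statement is the Claim_ definition above) =====
theorem create_list_to_write_spec : Claim_equal_create_list_to_write := by
  intro xs _ _
  unfold Spec_create_list_to_write create_list_to_write create_list_to_write_alt
  rw [(pvMain xs).1]
  simp [PySem.Dict.values, List.map_map, Function.comp]
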